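-- pv_equiv track=rewrite | github.com/themattbirch/score-genius | notebooks/basketball_metrics.py | add_basketball_metrics_to_features
-- ===== SOURCE A (Python) =====
-- def add_basketball_metrics_to_features(feature_sets):
--     """
--     Enhance the existing feature sets with basketball analytics metrics and team form.
--     This function integrates shooting, free throw, advanced metrics,
--     and defensive metrics into the quarter-specific feature sets.
--
--     Args:
--         feature_sets: Dictionary with feature lists for each quarter
--     Returns:
--         Updated feature sets with basketball analytics metrics
--     """
--     # These are the basketball analytics metrics to potentially add
--     shooting_metrics = ['home_fg_pct', 'away_fg_pct', 'fg_pct_diff', 'home_efg_pct', 'away_efg_pct']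
--     free_throw_metrics = ['home_ft_pct', 'away_ft_pct', 'ft_pct_diff', 'home_ft_rate', 'away_ft_rate']
--     advanced_metrics = ['home_possessions', 'away_possessions', 'game_pace',
--                        'home_off_efficiency', 'away_off_efficiency', 'efficiency_diff',
--                        'momentum_efficiency', 'pace_adj_diff']
--     form_metrics = ['home_form_score', 'form_score_diff', 'home_streak', 'streak_diff', 'total_momentum']
--     defensive_metrics = ['steal_diff', 'block_diff', 'def_reb_diff', 'def_efficiency_diff', 'turnover_rate_diff']
--
--     # Enhanced feature sets with basketball metrics
--     enhanced_sets = {}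
--     for quarter, features in feature_sets.items():
--         # Start with existing features
--         enhanced_features = features.copy()
--
--         # Add appropriate metrics based on quarter
--         if quarter == 'q1':
--             # For pre-game, team form is especially important
--             enhanced_features.extend([
--                 'fg_pct_diff',
--                 'ft_pct_diff',
--                 'efficiency_diff',
--                 'home_form_score',
--                 'streak_diff', # Form is key for pre-game prediction
--                 'def_reb_diff'  # Add defensive rebounding as a key pregame indicator
--             ])
--         elif quarter == 'q2':
--             # In Q2, current form still matters but in-game stats start to take over
--             enhanced_features.extend([
--                 'fg_pct_diff',
--                 'ft_pct_diff',
--                 'game_pace',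
--                 'efficiency_diff',
--                 'home_form_score',
--                 'total_momentum', # Combined momentum and form
--                 'steal_diff',     # Add defensive activity metrics
--                 'block_diff'
--             ])
--         elif quarter == 'q3':
--             # In Q3, form becomes less important as game stats take over
--             enhanced_features.extend([
--                 'fg_pct_diff',
--                 'ft_pct_diff',
--                 'game_pace',
--                 'efficiency_diff',
--                 'momentum_efficiency',
--                 'total_momentum',
--                 'def_efficiency_diff',  # Add defensive efficiency as games progress
--                 'turnover_rate_diff'
--             ])
--         elif quarter == 'q4':
--             # In Q4, use all available metrics
--             enhanced_features.extend([
--                 'fg_pct_diff',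
--                 'ft_pct_diff',
--                 'game_pace',
--                 'efficiency_diff',
--                 'momentum_efficiency',
--                 'pace_adj_diff',
--                 'total_momentum', # Still include form in late game scenarios
--                 'steal_diff',
--                 'block_diff',
--                 'def_efficiency_diff',
--                 'turnover_rate_diff'
--             ])
--
--         enhanced_sets[quarter] = enhanced_features
--
--     return enhanced_sets
-- ===== SOURCE B (Python) =====
-- # One ordered master list of metrics, each tagged with the set of quarters it
-- # applies to; per-quarter extras are recovered by filtering that single list.
-- _MASTER = [
--     ('fg_pct_diff',         {'q1', 'q2', 'q3', 'q4'}),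
--     ('ft_pct_diff',         {'q1', 'q2', 'q3', 'q4'}),
--     ('game_pace',           {'q2', 'q3', 'q4'}),
--     ('efficiency_diff',     {'q1', 'q2', 'q3', 'q4'}),
--     ('momentum_efficiency', {'q3', 'q4'}),
--     ('pace_adj_diff',       {'q4'}),
--     ('home_form_score',     {'q1', 'q2'}),
--     ('streak_diff',         {'q1'}),
--     ('total_momentum',      {'q2', 'q3', 'q4'}),
--     ('steal_diff',          {'q2', 'q4'}),
--     ('block_diff',          {'q2', 'q4'}),
--     ('def_reb_diff',        {'q1'}),
--     ('def_efficiency_diff', {'q3', 'q4'}),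
--     ('turnover_rate_diff',  {'q3', 'q4'}),
-- ]
--
-- def add_basketball_metrics_to_features(feature_sets):
--     enhanced_sets = {}
--     for quarter, features in feature_sets.items():
--         enhanced_sets[quarter] = features + [m for m, qs in _MASTER if quarter in qs]
--     return enhanced_sets
-- ===== Notes on version B (the rewrite author's own statement) =====
-- stated objective: alternative
-- what changed: Replaces the four hard-coded per-quarter extra lists dispatched by an if/elif chain with a single ordered master list of metrics tagged with the set of quarters each applies to; per-quarter extras are derived by filtering that inverted index, so unknown quarters naturally get nothing.
import Mathlib
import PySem

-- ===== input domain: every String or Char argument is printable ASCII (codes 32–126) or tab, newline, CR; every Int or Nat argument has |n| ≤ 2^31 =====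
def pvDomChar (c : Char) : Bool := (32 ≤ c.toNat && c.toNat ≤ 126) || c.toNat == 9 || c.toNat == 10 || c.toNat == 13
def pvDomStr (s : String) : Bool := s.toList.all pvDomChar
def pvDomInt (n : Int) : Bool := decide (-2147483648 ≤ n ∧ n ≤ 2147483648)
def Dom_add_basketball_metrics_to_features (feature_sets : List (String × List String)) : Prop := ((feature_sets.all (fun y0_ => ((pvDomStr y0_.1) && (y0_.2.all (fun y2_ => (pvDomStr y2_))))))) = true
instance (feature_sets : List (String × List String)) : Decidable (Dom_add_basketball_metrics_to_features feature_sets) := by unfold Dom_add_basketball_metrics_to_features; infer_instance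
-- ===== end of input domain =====

-- B replaces A's four hard-coded per-quarter lists and if/elif dispatch by one
-- ordered master list of metrics tagged with the quarters each applies to,
-- filtered per quarter (objective: alternative).

-- ===== PORT A =====
-- A's loop body: copy the features, then the if/elif chain extends them per quarter.
def pvEnhanceA (quarter : String) (features : List String) : List String :=
  if quarter == "q1" then
    features ++ ["fg_pct_diff", "ft_pct_diff", "efficiency_diff", "home_form_score",
                 "streak_diff", "def_reb_diff"]
  else if quarter == "q2" then
    features ++ ["fg_pct_diff", "ft_pct_diff", "game_pace", "efficiency_diff",
                 "home_form_score", "total_momentum", "steal_diff", "block_diff"]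
  else if quarter == "q3" then
    features ++ ["fg_pct_diff", "ft_pct_diff", "game_pace", "efficiency_diff",
                 "momentum_efficiency", "total_momentum", "def_efficiency_diff",
                 "turnover_rate_diff"]
  else if quarter == "q4" then
    features ++ ["fg_pct_diff", "ft_pct_diff", "game_pace", "efficiency_diff",
                 "momentum_efficiency", "pace_adj_diff", "total_momentum", "steal_diff",
                 "block_diff", "def_efficiency_diff", "turnover_rate_diff"]
  else features

def add_basketball_metrics_to_features (feature_sets : List (String × List String)) : List (String × List String) :=
  ((feature_sets.foldl
      (fun enhanced_sets p => enhanced_sets.insert p.1 (pvEnhanceA p.1 p.2))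
      PySem.Dict.empty) : PySem.Dict String (List String)).items

-- ===== PORT B =====
-- the master list: each metric with the set of quarters it applies to
def pvMaster : List (String × PySem.Set String) :=
  [("fg_pct_diff",         PySem.Set.ofList ["q1", "q2", "q3", "q4"]),
   ("ft_pct_diff",         PySem.Set.ofList ["q1", "q2", "q3", "q4"]),
   ("game_pace",           PySem.Set.ofList ["q2", "q3", "q4"]),
   ("efficiency_diff",     PySem.Set.ofList ["q1", "q2", "q3", "q4"]),
   ("momentum_efficiency", PySem.Set.ofList ["q3", "q4"]),
   ("pace_adj_diff",       PySem.Set.ofList ["q4"]),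
   ("home_form_score",     PySem.Set.ofList ["q1", "q2"]),
   ("streak_diff",         PySem.Set.ofList ["q1"]),
   ("total_momentum",      PySem.Set.ofList ["q2", "q3", "q4"]),
   ("steal_diff",          PySem.Set.ofList ["q2", "q4"]),
   ("block_diff",          PySem.Set.ofList ["q2", "q4"]),
   ("def_reb_diff",        PySem.Set.ofList ["q1"]),
   ("def_efficiency_diff", PySem.Set.ofList ["q3", "q4"]),
   ("turnover_rate_diff",  PySem.Set.ofList ["q3", "q4"])]

-- the list comprehension [m for m, qs in _MASTER if quarter in qs]
def pvExtrasB (quarter : String) : List String :=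
  (pvMaster.filter (fun mq => mq.2.contains quarter)).map Prod.fst

def add_basketball_metrics_to_features_alt (feature_sets : List (String × List String)) : List (String × List String) :=
  ((feature_sets.foldl
      (fun enhanced_sets p => enhanced_sets.insert p.1 (p.2 ++ pvExtrasB p.1))
      PySem.Dict.empty) : PySem.Dict String (List String)).items

-- ===== PRECONDITION & SPEC =====
def Spec_add_basketball_metrics_to_features (feature_sets : List (String × List String)) (out : List (String × List String)) : Prop := out = add_basketball_metrics_to_features_alt feature_sets
instance (feature_sets : List (String × List String)) (out : List (String × List String)) : Decidable (Spec_add_basketball_metrics_to_features feature_sets out) := by unfold Spec_add_basketball_metrics_to_features; infer_instance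

-- ===== CLAIM =====
def Claim_equal_add_basketball_metrics_to_features : Prop := ∀ (feature_sets : List (String × List String)), Dom_add_basketball_metrics_to_features feature_sets → Spec_add_basketball_metrics_to_features feature_sets (add_basketball_metrics_to_features feature_sets)

-- ===== LEMMAS AND PROOFS =====
-- A's if/elif chain produces exactly features ++ the filtered master-list extras.
theorem pvEnhanceA_eq_filter (q : String) (f : List String) :
    pvEnhanceA q f = f ++ pvExtrasB q := by
  by_cases h1 : q = "q1"
  · subst h1; rfl
  by_cases h2 : q = "q2"
  · subst h2; rfl
  by_cases h3 : q = "q3"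
  · subst h3; rfl
  by_cases h4 : q = "q4"
  · subst h4; rfl
  -- unknown quarter: every membership test in the master list is false
  simp [pvEnhanceA, pvExtrasB, pvMaster, PySem.Set.contains, PySem.Set.ofList,
        beq_iff_eq, h1, h2, h3, h4]

-- the two folds have pointwise-equal step functions, so they agree from any start
theorem pv_fold_eq (l : List (String × List String)) (d : PySem.Dict String (List String)) :
    l.foldl (fun enhanced_sets p => enhanced_sets.insert p.1 (pvEnhanceA p.1 p.2)) d
      = l.foldl (fun enhanced_sets p => enhanced_sets.insert p.1 (p.2 ++ pvExtrasB p.1)) d := by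
  induction l generalizing d with
  | nil => rfl
  | cons p rest ih => simp [List.foldl_cons, pvEnhanceA_eq_filter]

-- ===== VERDICT =====
theorem add_basketball_metrics_to_features_spec : Claim_equal_add_basketball_metrics_to_features := by
  intro fs _
  unfold Spec_add_basketball_metrics_to_features add_basketball_metrics_to_features add_basketball_metrics_to_features_alt
  rw [pv_fold_eq]
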